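-- pv_equiv track=rewrite | github.com/ablab/nerpa | src/nerpa_pipeline/splitter.py | split_by_dist
-- ===== SOURCE A (Python) =====
-- def split_by_dist(parts, orf_pos):
--     possible_BGC = []
--     for BGC in parts:
--         cur_parts = []
--         for cur_orf in BGC:
--             if (len(cur_parts) > 0) and (orf_pos[cur_orf][0] - orf_pos[cur_parts[-1]][1] > 10000):
--                 possible_BGC.append(cur_parts)
--                 cur_parts = []
--             cur_parts.append(cur_orf)
--
--         if len(cur_parts) > 0:
--             possible_BGC.append(cur_parts)
--
--     return possible_BGC
-- ===== SOURCE B (Python) =====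
-- def split_by_dist(parts, orf_pos):
--     possible_BGC = []
--     for BGC in parts:
--         n = len(BGC)
--         breaks = [i for i in range(1, n)
--                   if orf_pos[BGC[i]][0] - orf_pos[BGC[i - 1]][1] > 10000]
--         bounds = [0] + breaks + [n]
--         possible_BGC.extend(BGC[b:c] for b, c in zip(bounds, bounds[1:]) if b < c)
--     return possible_BGC
-- ===== Notes on version B (the rewrite author's own statement) =====
-- stated objective: alternative
-- what changed: Replaces the accumulate-and-flush loop (growing cur_parts and flushing it on a gap) by computing, per BGC, the list of gap break indices with a comprehension and then slicing the BGC at those boundaries.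
import Mathlib
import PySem

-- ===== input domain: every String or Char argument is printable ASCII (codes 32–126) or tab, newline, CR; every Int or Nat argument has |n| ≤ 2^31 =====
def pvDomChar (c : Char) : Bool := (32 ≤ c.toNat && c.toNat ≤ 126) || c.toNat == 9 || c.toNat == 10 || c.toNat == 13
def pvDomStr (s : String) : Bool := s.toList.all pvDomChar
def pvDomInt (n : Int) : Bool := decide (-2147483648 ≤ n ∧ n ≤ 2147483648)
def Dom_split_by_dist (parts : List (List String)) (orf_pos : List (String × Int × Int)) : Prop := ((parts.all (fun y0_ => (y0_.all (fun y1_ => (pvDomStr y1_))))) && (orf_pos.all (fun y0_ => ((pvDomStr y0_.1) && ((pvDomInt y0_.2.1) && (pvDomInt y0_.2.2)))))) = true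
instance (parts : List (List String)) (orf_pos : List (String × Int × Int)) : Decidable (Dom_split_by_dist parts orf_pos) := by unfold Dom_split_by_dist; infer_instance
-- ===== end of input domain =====

-- B computes, per BGC, the gap break indices and slices the BGC there, instead of A's
-- accumulate-and-flush loop; same results, same linear cost (objective: alternative).

-- shared input decoding: orf_pos[k] (dict lookup; Pre_ guarantees the key is present)
def pvPos (orf_pos : List (String × Int × Int)) (k : String) : Int × Int :=
  (PySem.Dict.mk orf_pos).getD k (0, 0)

-- ===== PORT A =====
def pvStepA (orf_pos : List (String × Int × Int)) (st : List (List String) × List String)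
    (cur_orf : String) : List (List String) × List String :=
  let st :=
    if 0 < st.2.length ∧
        (pvPos orf_pos cur_orf).1 - (pvPos orf_pos (PySem.List.pyGetD st.2 (-1) "")).2 > 10000
    then (st.1 ++ [st.2], ([] : List String)) else st
  (st.1, st.2 ++ [cur_orf])

def pvBGC_A (orf_pos : List (String × Int × Int)) (poss : List (List String))
    (BGC : List String) : List (List String) :=
  let r := BGC.foldl (pvStepA orf_pos) (poss, [])
  if 0 < r.2.length then r.1 ++ [r.2] else r.1

def split_by_dist (parts : List (List String)) (orf_pos : List (String × Int × Int)) : List (List String) :=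
  parts.foldl (pvBGC_A orf_pos) []

-- ===== PORT B =====
def pvChunksB (orf_pos : List (String × Int × Int)) (BGC : List String) : List (List String) :=
  let n : Int := BGC.length
  let breaks := (PySem.List.pyRange 1 n 1).filter (fun i =>
    decide ((pvPos orf_pos (PySem.List.pyGetD BGC i "")).1
            - (pvPos orf_pos (PySem.List.pyGetD BGC (i - 1) "")).2 > 10000))
  let bounds := 0 :: breaks ++ [n]
  (bounds.zip bounds.tail).filterMap (fun p =>
    if p.1 < p.2 then some (PySem.List.slice BGC (some p.1) (some p.2)) else none)

def split_by_dist_alt (parts : List (List String)) (orf_pos : List (String × Int × Int)) : List (List String) :=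
  parts.foldl (fun out BGC => out ++ pvChunksB orf_pos BGC) []

-- ===== PRECONDITION & SPEC =====
-- Pre_ excludes inputs where a BGC with at least two ORFs contains an ORF that is not a key of
-- orf_pos: exactly there A (and B) look the ORF up and raise KeyError (singleton BGCs are never looked up).
def Pre_split_by_dist (parts : List (List String)) (orf_pos : List (String × Int × Int)) : Prop :=
  ∀ BGC ∈ parts, 2 ≤ BGC.length → ∀ orf ∈ BGC, orf ∈ orf_pos.map (·.1)
instance (parts : List (List String)) (orf_pos : List (String × Int × Int)) : Decidable (Pre_split_by_dist parts orf_pos) := by unfold Pre_split_by_dist; infer_instance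

def pvWitness_split_by_dist : List (List String) × (List (String × Int × Int)) :=
  ([["a", "b", "c"], ["c"], []], [("a", (0, 5)), ("b", (20000, 20010)), ("c", (1, 2))])

def Spec_split_by_dist (parts : List (List String)) (orf_pos : List (String × Int × Int)) (out : List (List String)) : Prop := out = split_by_dist_alt parts orf_pos
instance (parts : List (List String)) (orf_pos : List (String × Int × Int)) (out : List (List String)) : Decidable (Spec_split_by_dist parts orf_pos out) := by unfold Spec_split_by_dist; infer_instance

-- ===== CLAIM (what is proved, stated in full; the proofs are below) =====
def Claim_equal_split_by_dist : Prop := ∀ (parts : List (List String)) (orf_pos : List (String × Int × Int)), Dom_split_by_dist parts orf_pos → Pre_split_by_dist parts orf_pos → Spec_split_by_dist parts orf_pos (split_by_dist parts orf_pos)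

-- ===== LEMMAS AND PROOFS =====

-- the gap predicate both programs test between consecutive ORFs
def pvGap (orf_pos : List (String × Int × Int)) (a b : String) : Bool :=
  decide ((pvPos orf_pos b).1 - (pvPos orf_pos a).2 > 10000)

-- reference chunking: greedily extend the current group, start a new one at a gap
def pvGlue (g : String → String → Bool) (cur : List String) : List String → List (List String)
  | [] => [cur]
  | y :: ys => if g (cur.getLastD "") y then cur :: pvGlue g [y] ys else pvGlue g (cur ++ [y]) ys

def pvChunks (g : String → String → Bool) : List String → List (List String)
  | [] => []
  | x :: xs => pvGlue g [x] xs

-- Nat-level restatement of B's per-BGC computation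
def pvBr (g : String → String → Bool) (l : List String) : List Nat :=
  ((List.range (l.length - 1)).filter
    (fun k => g (l.getD k "") (l.getD (k + 1) ""))).map (· + 1)

def pvSliceAll (l : List String) (bounds : List Nat) : List (List String) :=
  (bounds.zip bounds.tail).filterMap (fun p =>
    if p.1 < p.2 then some ((l.drop p.1).take (p.2 - p.1)) else none)

def pvChunksN (g : String → String → Bool) (l : List String) : List (List String) :=
  pvSliceAll l (0 :: (pvBr g l ++ [l.length]))

-- == A side: the accumulate-and-flush loop computes pvChunks ==

theorem pvFlushA (orf_pos : List (String × Int × Int)) :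
    ∀ (xs : List String) (poss : List (List String)) (cur : List String), cur ≠ [] →
      (let r := xs.foldl (pvStepA orf_pos) (poss, cur);
       if 0 < r.2.length then r.1 ++ [r.2] else r.1) = poss ++ pvGlue (pvGap orf_pos) cur xs := by
  intro xs
  induction xs with
  | nil =>
      intro poss cur h
      simp [pvGlue, List.length_pos_iff, h]
  | cons x xs ih =>
      intro poss cur h
      have hlast : PySem.List.pyGetD cur (-1) "" = cur.getLastD "" := by
        rw [PySem.List.pyGetD_neg_one cur "" h]
        simp [List.getLastD_eq_getLast?, List.getLast?_eq_some_getLast h]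
      have hstep : pvStepA orf_pos (poss, cur) x =
          if pvGap orf_pos (cur.getLastD "") x then (poss ++ [cur], [x]) else (poss, cur ++ [x]) := by
        simp only [pvStepA, hlast, pvGap]
        by_cases hc : (pvPos orf_pos x).1 - (pvPos orf_pos (cur.getLastD "")).2 > 10000
        · rw [if_pos ⟨List.length_pos_of_ne_nil h, hc⟩, if_pos (by simpa using hc)]
          rfl
        · rw [if_neg (fun hh => hc hh.2), if_neg (by simpa using hc)]
      rw [pvGlue]
      simp only [List.foldl_cons, hstep]
      by_cases hg : pvGap orf_pos (cur.getLastD "") x = true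
      · rw [if_pos hg, if_pos hg, ih (poss ++ [cur]) [x] (by simp), List.append_assoc]
        rfl
      · rw [if_neg hg, if_neg hg, ih poss (cur ++ [x]) (by simp)]

theorem pvBGC_A_eq (orf_pos : List (String × Int × Int)) (poss : List (List String)) (BGC : List String) :
    pvBGC_A orf_pos poss BGC = poss ++ pvChunks (pvGap orf_pos) BGC := by
  unfold pvBGC_A
  cases BGC with
  | nil => simp [pvChunks]
  | cons x xs =>
      have h1 : pvStepA orf_pos (poss, []) x = (poss, [x]) := by
        simp [pvStepA]
      simp only [List.foldl_cons, h1]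
      exact pvFlushA orf_pos xs poss [x] (by simp)

-- == B side: the break-indices-and-slices computation also computes pvChunks ==

theorem pvChunksB_eq_N (orf_pos : List (String × Int × Int)) (BGC : List String) :
    pvChunksB orf_pos BGC = pvChunksN (pvGap orf_pos) BGC := by
  simp only [pvChunksB, pvChunksN, pvSliceAll]
  have hbreaks : (PySem.List.pyRange 1 (BGC.length : Int) 1).filter (fun i =>
      decide ((pvPos orf_pos (PySem.List.pyGetD BGC i "")).1
              - (pvPos orf_pos (PySem.List.pyGetD BGC (i - 1) "")).2 > 10000))
      = (pvBr (pvGap orf_pos) BGC).map (fun m => Int.ofNat m) := by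
    rw [PySem.List.pyRange_one]
    have hn : ((BGC.length : Int) - 1).toNat = BGC.length - 1 := by omega
    rw [hn]
    have hfun : (fun k : Nat => (1 : Int) + ↑k) = fun k : Nat => Int.ofNat (k + 1) := by
      funext k; simp [Int.ofNat_eq_natCast]; ring
    rw [hfun]
    rw [show (fun k : Nat => Int.ofNat (k + 1)) = ((fun m : Nat => Int.ofNat m) ∘ (· + 1)) from rfl,
      ← List.map_map, List.filter_map, List.filter_map]
    unfold pvBr
    apply congrArg
    apply congrArg
    apply List.filter_congr
    intro k hk
    have e1 : Int.ofNat (k + 1) = ((k + 1 : Nat) : Int) := rfl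
    have e2 : ((k + 1 : Nat) : Int) - 1 = ((k : Nat) : Int) := by push_cast; ring
    simp only [Function.comp_def, e1, e2, PySem.List.pyGetD_natCast, pvGap]
  rw [hbreaks]
  have hbounds : (0 : Int) :: (pvBr (pvGap orf_pos) BGC).map (fun m => Int.ofNat m) ++ [(BGC.length : Int)]
      = ((0 :: (pvBr (pvGap orf_pos) BGC ++ [BGC.length])).map (fun m => Int.ofNat m)) := by
    simp
  rw [hbounds]
  rw [← List.map_tail, List.zip_map, List.filterMap_map]
  apply List.filterMap_congr
  intro p _
  simp only [Function.comp_def, Prod.map, Int.ofNat_eq_natCast, PySem.List.slice_natCast]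
  simp

theorem pvSliceShift (x : String) (xs : List String) (ns : List Nat) :
    pvSliceAll (x :: xs) (ns.map (· + 1)) = pvSliceAll xs ns := by
  unfold pvSliceAll
  rw [← List.map_tail, List.zip_map, List.filterMap_map]
  apply List.filterMap_congr
  intro p _
  simp [Prod.map, Nat.succ_sub_succ]

theorem pvSliceCons0 (l : List String) (m : Nat) (hm : 0 < m) (ns : List Nat) :
    pvSliceAll l (0 :: m :: ns) = l.take m :: pvSliceAll l (m :: ns) := by
  simp [pvSliceAll, hm]

theorem pvBrCons (g : String → String → Bool) (x y : String) (rest : List String) :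
    pvBr g (x :: y :: rest) = (if g x y then [1] else []) ++ (pvBr g (y :: rest)).map (· + 1) := by
  unfold pvBr
  simp only [List.length_cons, Nat.add_sub_cancel, List.range_succ_eq_map,
    List.filter_cons, List.filter_map, List.map_map]
  simp only [List.getD_cons_zero, List.getD_cons_succ]
  by_cases h : g x y <;> simp [h, Function.comp_def]

theorem pvGlueExtend (g : String → String → Bool) :
    ∀ (xs cur pre : List String), cur ≠ [] →
      pvGlue g (pre ++ cur) xs = (pre ++ (pvGlue g cur xs).headD []) :: (pvGlue g cur xs).tail := by
  intro xs
  induction xs with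
  | nil => intro cur pre h; simp [pvGlue]
  | cons y ys ih =>
      intro cur pre h
      have hl : (pre ++ cur).getLastD "" = cur.getLastD "" := by
        cases cur with
        | nil => exact absurd rfl h
        | cons c cs =>
            obtain ⟨z, hz⟩ : ∃ z, (c :: cs).getLast? = some z :=
              Option.isSome_iff_exists.mp (by simp)
            simp [List.getLastD_eq_getLast?, hz]
      rw [pvGlue, pvGlue, hl]
      by_cases hg : g (cur.getLast?.getD "") y
      · simp [List.getLastD_eq_getLast?, hg]
      · simp only [List.getLastD_eq_getLast?, hg, Bool.false_eq_true, if_false]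
        rw [List.append_assoc]
        exact ih (cur ++ [y]) pre (by simp)

theorem pvBrPos (g : String → String → Bool) (l : List String) : ∀ m ∈ pvBr g l, 0 < m := by
  unfold pvBr
  intro m hm
  simp only [List.mem_map] at hm
  obtain ⟨k, _, rfl⟩ := hm
  omega

theorem pvChunksN_eq (g : String → String → Bool) :
    ∀ l, pvChunksN g l = pvChunks g l := by
  intro l
  induction l with
  | nil => rfl
  | cons x xs ih =>
      cases xs with
      | nil => rfl
      | cons y rest =>
          obtain ⟨m, ns, hmns, hm⟩ : ∃ m ns, pvBr g (y :: rest) ++ [(y :: rest).length] = m :: ns ∧ 0 < m := by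
            cases hbr : pvBr g (y :: rest) with
            | nil => exact ⟨(y :: rest).length, [], by simp, by simp⟩
            | cons a t => exact ⟨a, t ++ [(y :: rest).length], by simp,
                pvBrPos g (y :: rest) a (by rw [hbr]; exact List.mem_cons_self)⟩
          have hN : pvChunks g (y :: rest) = (y :: rest).take m :: pvSliceAll (y :: rest) (m :: ns) := by
            rw [← ih, pvChunksN, hmns, pvSliceCons0 _ m hm]
          have hmap : pvBr g (x :: y :: rest) ++ [(x :: y :: rest).length]
              = (if g x y then [1] else []) ++ (m + 1) :: ns.map (· + 1) := by
            rw [pvBrCons, List.append_assoc]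
            congr 1
            rw [show (x :: y :: rest).length = (y :: rest).length + 1 from rfl,
              show [(y :: rest).length + 1] = [(y :: rest).length].map (· + 1) from rfl,
              ← List.map_append, hmns]
            rfl
          have hRHS : pvChunks g (x :: y :: rest) =
              if g x y then [x] :: pvChunks g (y :: rest)
              else pvGlue g ([x] ++ [y]) rest := by
            rw [show pvChunks g (x :: y :: rest) = pvGlue g [x] (y :: rest) from rfl, pvGlue,
              show pvChunks g (y :: rest) = pvGlue g [y] rest from rfl]
            simp [List.getLastD_eq_getLast?]
          by_cases hg : g x y
          · rw [pvChunksN, hmap, if_pos hg, hRHS, if_pos hg]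
            rw [List.singleton_append,
              pvSliceCons0 _ 1 one_pos,
              show (1 : Nat) :: (m + 1) :: ns.map (· + 1) = (0 :: m :: ns).map (· + 1) from by simp,
              pvSliceShift]
            rw [show pvSliceAll (y :: rest) (0 :: m :: ns) = pvChunksN g (y :: rest) from by
              rw [pvChunksN, hmns], ih]
            rfl
          · rw [pvChunksN, hmap, if_neg hg, hRHS, if_neg hg]
            rw [List.nil_append,
              pvSliceCons0 _ (m + 1) (Nat.succ_pos m),
              show (m + 1) :: ns.map (· + 1) = ((m :: ns).map (· + 1)) from rfl,
              pvSliceShift, List.take_succ_cons]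
            rw [pvGlueExtend g rest [y] [x] (by simp),
              show pvGlue g [y] rest = pvChunks g (y :: rest) from rfl, hN]
            simp

theorem pvMain (orf_pos : List (String × Int × Int)) :
    ∀ parts, split_by_dist parts orf_pos = split_by_dist_alt parts orf_pos := by
  intro parts
  unfold split_by_dist split_by_dist_alt
  induction parts using List.reverseRecOn with
  | nil => rfl
  | append_singleton init BGC ih =>
      simp only [List.foldl_append, List.foldl_cons, List.foldl_nil, ih,
        pvBGC_A_eq, pvChunksB_eq_N, pvChunksN_eq]

-- ===== VERDICT (by name: the statement is the Claim_ definition above) =====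
theorem split_by_dist_spec : Claim_equal_split_by_dist :=
  fun parts orf_pos _ _ => pvMain orf_pos parts
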